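-- pv_equiv track=rewrite | github.com/Bushmelev/agentPINNs | reward_sweep/plot_reward_sweep_histories.py | selected_rewards
-- ===== SOURCE A (Python) =====
-- from typing import Any
--
-- ALL_REWARDS = [
--     "fixed",
--     "log_ratio",
--     "relative_improvement",
--     "component_relative_improvement",
--     "baseline_gap",
--     "normalized_baseline_gap",
--     "normalized_baseline_gap_delta",
--     "relative_l2_improvement",
--     "relative_l2_baseline_gap",
--     "relative_l2_baseline_gap_delta",
--     "log_normalized_baseline_gap",
--     "component_baseline_gap",
--     "worst_component_baseline_gap",
--     "loss_l2_hybrid",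
--     "progressive_loss_l2_hybrid",
--     "worst_component_relative_improvement",
--     "component_balance_penalty",
--     "relative_l2_log_improvement",
--     "loss_l2_self_hybrid",
--     "running_best_l2_reward",
-- ]
--
-- def selected_rewards(histories: dict[str, dict[str, Any]], requested: str | None, no_fixed: bool) -> list[str]:
--     available = set(histories)
--     if requested:
--         selected = [item.strip() for item in requested.split(",") if item.strip()]
--         missing = sorted(set(selected) - available)
--         if missing:
--             raise ValueError(f"Requested rewards are missing: {missing}")
--     else:
--         selected = [reward for reward in ALL_REWARDS if reward in available]
--         selected.extend(sorted(available - set(selected)))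
--     if no_fixed:
--         selected = [reward for reward in selected if reward != "fixed"]
--     return selected
-- ===== SOURCE B (Python) =====
-- ALL_REWARDS = [
--     "fixed",
--     "log_ratio",
--     "relative_improvement",
--     "component_relative_improvement",
--     "baseline_gap",
--     "normalized_baseline_gap",
--     "normalized_baseline_gap_delta",
--     "relative_l2_improvement",
--     "relative_l2_baseline_gap",
--     "relative_l2_baseline_gap_delta",
--     "log_normalized_baseline_gap",
--     "component_baseline_gap",
--     "worst_component_baseline_gap",
--     "loss_l2_hybrid",
--     "progressive_loss_l2_hybrid",
--     "worst_component_relative_improvement",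
--     "component_balance_penalty",
--     "relative_l2_log_improvement",
--     "loss_l2_self_hybrid",
--     "running_best_l2_reward",
-- ]
--
-- def selected_rewards(histories, requested, no_fixed):
--     available = set(histories)
--     if requested:
--         selected = []
--         missing = []
--         for item in requested.split(","):
--             name = item.strip()
--             if name:
--                 selected.append(name)
--                 if name not in available:
--                     missing.append(name)
--         if missing:
--             raise ValueError(f"Requested rewards are missing: {sorted(set(missing))}")
--     else:
--         rank = {name: i for i, name in enumerate(ALL_REWARDS)}
--         selected = sorted(available, key=lambda x: (rank.get(x, len(ALL_REWARDS)), x))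
--     if no_fixed:
--         selected = [reward for reward in selected if reward != "fixed"]
--     return selected
-- ===== Notes on version B (the rewrite author's own statement) =====
-- stated objective: simpler
-- what changed: The no-requested branch's two passes (filter ALL_REWARDS by availability, then append the sorted leftovers) become one sort of the available names keyed by (rank in ALL_REWARDS with max-rank fallback, name), and the requested branch's build-list/set-difference/sort validation becomes one streaming loop that collects names and missing names together.
import Mathlib
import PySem

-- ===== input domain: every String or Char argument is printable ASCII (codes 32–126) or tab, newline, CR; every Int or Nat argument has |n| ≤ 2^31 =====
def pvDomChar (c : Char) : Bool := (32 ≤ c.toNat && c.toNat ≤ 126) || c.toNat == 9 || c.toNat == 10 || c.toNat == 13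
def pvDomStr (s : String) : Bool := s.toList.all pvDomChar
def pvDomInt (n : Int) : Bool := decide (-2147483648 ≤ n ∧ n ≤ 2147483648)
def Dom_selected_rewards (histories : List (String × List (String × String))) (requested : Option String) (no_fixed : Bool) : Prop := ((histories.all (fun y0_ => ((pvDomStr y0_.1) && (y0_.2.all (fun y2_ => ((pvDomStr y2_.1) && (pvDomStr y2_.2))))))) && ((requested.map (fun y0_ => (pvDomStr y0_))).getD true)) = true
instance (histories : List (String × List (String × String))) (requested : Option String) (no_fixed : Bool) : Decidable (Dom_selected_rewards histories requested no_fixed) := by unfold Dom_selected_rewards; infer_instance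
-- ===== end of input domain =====

-- B replaces A's two-pass default branch (filter ALL_REWARDS by availability, then append the sorted
-- leftovers) by a single rank-keyed sort, and A's build-then-set-difference validation of the requested
-- names by one streaming loop (objective: simpler). Inside Pre_ neither program raises.

def ALL_REWARDS : List String := [
  "fixed", "log_ratio", "relative_improvement", "component_relative_improvement",
  "baseline_gap", "normalized_baseline_gap", "normalized_baseline_gap_delta",
  "relative_l2_improvement", "relative_l2_baseline_gap", "relative_l2_baseline_gap_delta",
  "log_normalized_baseline_gap", "component_baseline_gap", "worst_component_baseline_gap",
  "loss_l2_hybrid", "progressive_loss_l2_hybrid", "worst_component_relative_improvement",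
  "component_balance_penalty", "relative_l2_log_improvement", "loss_l2_self_hybrid",
  "running_best_l2_reward"]

-- ===== PORT A =====
-- A's else branch: [r for r in ALL_REWARDS if r in available] extended by sorted(available - set(selected))
def defaultSelA (available : PySem.Set String) : List String :=
  let sel := ALL_REWARDS.filter (fun r => PySem.Set.contains available r)
  sel ++ PySem.List.sorted (PySem.Set.diff available (PySem.Set.ofList sel)) (fun x => x)

def selected_rewards (histories : List (String × List (String × String))) (requested : Option String) (no_fixed : Bool) : List String :=
  let available : PySem.Set String := PySem.Set.ofList (histories.map Prod.fst)
  let selected : List String :=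
    match requested with
    | some s =>
      if s = "" then defaultSelA available
      else
        let sel := (((PySem.Str.split? s ",").getD []).map PySem.Str.strip).filter (fun t => t ≠ "")
        let missing := PySem.List.sorted (PySem.Set.diff (PySem.Set.ofList sel) available) (fun x => x)
        if missing ≠ [] then []
        else sel
    | none => defaultSelA available
  if no_fixed then selected.filter (fun r => r ≠ "fixed") else selected

-- ===== PORT B =====
-- rank = {name: i for i, name in enumerate(ALL_REWARDS)}
def rankDict : PySem.Dict String Int :=
  (PySem.List.enumerate ALL_REWARDS).foldl (fun d p => d.insert p.2 p.1) PySem.Dict.empty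

-- sorted(available, key=lambda x: (rank.get(x, len(ALL_REWARDS)), x))
def defaultSelB (available : PySem.Set String) : List String :=
  PySem.List.sorted2 available (fun x => rankDict.getD x (ALL_REWARDS.length : Int)) (fun x => x)

-- one iteration of B's streaming validation loop over requested.split(",")
def reqStep (available : PySem.Set String) (st : List String × List String) (item : String) : List String × List String :=
  let name := PySem.Str.strip item
  if name ≠ "" then
    (st.1 ++ [name], if PySem.Set.contains available name then st.2 else st.2 ++ [name])
  else st

def selected_rewards_alt (histories : List (String × List (String × String))) (requested : Option String) (no_fixed : Bool) : List String :=
  let available : PySem.Set String := PySem.Set.ofList (histories.map Prod.fst)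
  let selected : List String :=
    match requested with
    | some s =>
      if s = "" then defaultSelB available
      else
        let st := ((PySem.Str.split? s ",").getD []).foldl (reqStep available) ([], [])
        if st.2 ≠ [] then []
        else st.1
    | none => defaultSelB available
  if no_fixed then selected.filter (fun r => r ≠ "fixed") else selected

-- ===== PRECONDITION & SPEC =====
-- Pre_ excludes exactly the inputs on which A raises ValueError: a truthy `requested` containing a
-- stripped nonempty name that is not a key of `histories`.
def Pre_selected_rewards (histories : List (String × List (String × String))) (requested : Option String) (no_fixed : Bool) : Prop :=
  ∀ item ∈ (PySem.Str.split? (requested.getD "") ",").getD [],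
    PySem.Str.strip item = "" ∨ PySem.Str.strip item ∈ histories.map Prod.fst
instance (histories : List (String × List (String × String))) (requested : Option String) (no_fixed : Bool) : Decidable (Pre_selected_rewards histories requested no_fixed) := by unfold Pre_selected_rewards; infer_instance

def pvWitness_selected_rewards : (List (String × List (String × String))) × Option String × Bool :=
  ([("fixed", []), ("log_ratio", [])], some " log_ratio ,fixed", false)

def Spec_selected_rewards (histories : List (String × List (String × String))) (requested : Option String) (no_fixed : Bool) (out : List String) : Prop := out = selected_rewards_alt histories requested no_fixed
instance (histories : List (String × List (String × String))) (requested : Option String) (no_fixed : Bool) (out : List String) : Decidable (Spec_selected_rewards histories requested no_fixed out) := by unfold Spec_selected_rewards; infer_instance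

-- ===== CLAIM (what is proved, stated in full; the proofs are below) =====
def Claim_equal_selected_rewards : Prop := ∀ (histories : List (String × List (String × String))) (requested : Option String) (no_fixed : Bool), Dom_selected_rewards histories requested no_fixed → Pre_selected_rewards histories requested no_fixed → Spec_selected_rewards histories requested no_fixed (selected_rewards histories requested no_fixed)

-- ===== LEMMAS AND PROOFS =====

theorem sorted2_eq_sorted_lex {α : Type} (xs : List α) (k1 : α → Int) (k2 : α → String) :
    PySem.List.sorted2 xs k1 k2 = PySem.List.sorted xs (fun x => toLex (k1 x, k2 x)) := by
  have hb : (fun (a b : α) => decide (k1 a < k1 b) || (!decide (k1 b < k1 a) && decide (k2 a < k2 b)))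
      = (fun a b => decide ((fun x => toLex (k1 x, k2 x)) a < (fun x => toLex (k1 x, k2 x)) b)) := by
    funext a b
    by_cases h1 : k1 a < k1 b <;> by_cases h2 : k1 b < k1 a <;>
      by_cases h3 : k2 a < k2 b <;>
      simp [Prod.Lex.lt_iff, h1, h2, h3] <;> omega
  rw [PySem.List.sorted_eq_foldl_insertBy]
  show List.foldl (fun acc x => PySem.List.insertBy _ x acc) [] xs = _
  rw [hb]
  simp

theorem rank_lt_of_mem : ∀ x ∈ ALL_REWARDS, rankDict.getD x 20 < 20 := by decide

theorem rank_pairwise : ALL_REWARDS.Pairwise (fun a b => rankDict.getD a 20 < rankDict.getD b 20) := by decide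

theorem all_nodup : ALL_REWARDS.Nodup := by decide

theorem rank_eq_of_not_mem (x : String) (hx : x ∉ ALL_REWARDS) : rankDict.getD x 20 = 20 := by
  have hkeys : rankDict.keys = PySem.Set.ofList ALL_REWARDS := by
    have h := PySem.Dict.keys_foldl_insert_key (κ := String) (ν := Int)
      (l := PySem.List.enumerate ALL_REWARDS) (key := fun p => p.2)
      (f := fun _ p => p.1) (d := PySem.Dict.empty)
    simp only [PySem.List.map_snd_enumerate] at h
    rw [show (PySem.Dict.empty : PySem.Dict String Int).keys = [] from rfl,
      PySem.Set.update_nil_left] at h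
    exact h
  have hget : rankDict.get? x = none := by
    rw [PySem.Dict.get?_eq_none_iff_not_mem_keys, hkeys, PySem.Set.mem_ofList]
    exact hx
  show (rankDict.get? x).getD 20 = 20
  rw [hget]; rfl

theorem default_eq (available : PySem.Set String) (hnd : available.Nodup) :
    defaultSelB available = defaultSelA available := by
  unfold defaultSelA defaultSelB
  rw [sorted2_eq_sorted_lex, show ((ALL_REWARDS.length : Nat) : Int) = 20 from by decide]
  set key : String → Lex (Int × String) := fun x => toLex (rankDict.getD x 20, x) with hkey
  show PySem.List.sorted available key = _
  set sel := ALL_REWARDS.filter (fun r => PySem.Set.contains available r) with hsel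
  have memsel : ∀ x, x ∈ sel ↔ x ∈ ALL_REWARDS ∧ x ∈ available := by
    intro x
    simp [hsel, List.mem_filter]
  have hrest0 : PySem.Set.diff available (PySem.Set.ofList sel)
      = available.filter (fun x => !ALL_REWARDS.contains x) := by
    show available.filter _ = _
    apply List.filter_congr
    intro x hxav
    have : (PySem.Set.ofList sel).contains x = ALL_REWARDS.contains x := by
      by_cases hm : x ∈ ALL_REWARDS
      · have h1 : x ∈ PySem.Set.ofList sel := by
          rw [PySem.Set.mem_ofList, memsel]; exact ⟨hm, hxav⟩
        have h2 : (PySem.Set.ofList sel).contains x = true := (PySem.Set.contains_iff _ _).mpr h1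
        have h3 : ALL_REWARDS.contains x = true := List.contains_iff_mem.mpr hm
        rw [h2, h3]
      · have h1 : x ∉ PySem.Set.ofList sel := by
          rw [PySem.Set.mem_ofList, memsel]; tauto
        have h2 : (PySem.Set.ofList sel).contains x = false := by
          rw [← Bool.not_eq_true, PySem.Set.contains_iff]; exact h1
        have h3 : ALL_REWARDS.contains x = false := by
          rw [← Bool.not_eq_true, List.contains_iff_mem]; exact hm
        rw [h2, h3]
    rw [this]
  change PySem.List.sorted available key = sel ++ PySem.List.sorted (PySem.Set.diff available (PySem.Set.ofList sel)) (fun x => x)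
  set rest := PySem.List.sorted (PySem.Set.diff available (PySem.Set.ofList sel)) (fun x => x) with hrest
  have hrestperm : rest.Perm (available.filter (fun x => !ALL_REWARDS.contains x)) := by
    rw [hrest, hrest0]; exact PySem.List.sorted_perm _ _ _
  have hrestmem : ∀ x ∈ rest, x ∈ available ∧ x ∉ ALL_REWARDS := by
    intro x hx
    have h := hrestperm.mem_iff.mp hx
    simp only [List.mem_filter, Bool.not_eq_eq_eq_not, Bool.not_true,
      ← Bool.not_eq_true, List.contains_iff_mem] at h
    exact ⟨h.1, by simpa using h.2⟩
  have hselnodup : sel.Nodup := all_nodup.filter _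
  apply PySem.List.sorted_eq_of_perm_of_pairwise_lt
  · -- Perm
    have h1 : sel.Perm (available.filter (fun x => ALL_REWARDS.contains x)) := by
      rw [List.perm_ext_iff_of_nodup hselnodup (hnd.filter _)]
      intro a
      simp [memsel, List.mem_filter]
      tauto
    exact List.Perm.trans (h1.append hrestperm) (List.filter_append_perm _ _)
  · -- Pairwise
    rw [List.pairwise_append]
    refine ⟨?_, ?_, ?_⟩
    · apply (rank_pairwise.filter _).imp_of_mem
      intro a b ha hb hlt
      have := (memsel a).mp ha
      simp [hkey, Prod.Lex.lt_iff]
      refine Or.inl ?_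
      omega
    · have hnodup : rest.Nodup := (hrestperm.nodup_iff).mpr ((hnd.filter _))
      have hle : rest.Pairwise (fun a b => a ≤ b) :=
        PySem.List.sorted_pairwise (PySem.Set.diff available (PySem.Set.ofList sel)) (fun x => x)
      have := hle.and hnodup
      apply this.imp_of_mem
      intro a b ha hb hab
      have h20a := rank_eq_of_not_mem a (hrestmem a ha).2
      have h20b := rank_eq_of_not_mem b (hrestmem b hb).2
      simp only [hkey, Prod.Lex.lt_iff, ofLex_toLex, h20a, h20b]
      exact Or.inr ⟨trivial, lt_of_le_of_ne hab.1 hab.2⟩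
    · intro a ha b hb
      have h20b := rank_eq_of_not_mem b (hrestmem b hb).2
      have hlta := rank_lt_of_mem a ((memsel a).mp ha).1
      simp [hkey, Prod.Lex.lt_iff]
      refine Or.inl ?_
      omega

theorem foldl_req (av : PySem.Set String) (l : List String) (acc bd : List String) :
    l.foldl (reqStep av) (acc, bd) =
      (acc ++ (l.map PySem.Str.strip).filter (fun t => t ≠ ""),
       bd ++ (l.map PySem.Str.strip).filter (fun t => decide (t ≠ "") && !PySem.Set.contains av t)) := by
  induction l generalizing acc bd with
  | nil => simp
  | cons x xs ih =>
    simp only [List.foldl_cons, List.map_cons, List.filter_cons]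
    by_cases hx : PySem.Str.strip x = ""
    · rw [show reqStep av (acc, bd) x = (acc, bd) from by simp [reqStep, hx]]
      rw [ih]
      simp [hx]
    · by_cases hc : PySem.Set.contains av (PySem.Str.strip x) = true
      · rw [show reqStep av (acc, bd) x = (acc ++ [PySem.Str.strip x], bd) from by
          simp only [reqStep, if_pos (by exact hx), hc, if_true]]
        rw [ih]
        simp [hx]
        exact (PySem.Set.contains_iff _ _).mp hc
      · have hc' : PySem.Set.contains av (PySem.Str.strip x) = false := by
          rw [← Bool.not_eq_true]; exact hc
        rw [show reqStep av (acc, bd) x = (acc ++ [PySem.Str.strip x], bd ++ [PySem.Str.strip x]) from by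
          simp only [reqStep, if_pos (by exact hx), hc', Bool.false_eq_true, if_false]]
        rw [ih]
        simp [hx]
        exact fun hmem => hc ((PySem.Set.contains_iff _ _).mpr hmem)

theorem agree : ∀ (histories : List (String × List (String × String))) (requested : Option String) (no_fixed : Bool), Pre_selected_rewards histories requested no_fixed → selected_rewards histories requested no_fixed = selected_rewards_alt histories requested no_fixed := by
  intro h r n hpre
  unfold selected_rewards selected_rewards_alt
  dsimp only
  have hnd : (PySem.Set.ofList (h.map Prod.fst)).Nodup := PySem.Set.nodup_ofList _
  cases r with
  | none => rw [default_eq _ hnd]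
  | some s =>
    by_cases hs : s = ""
    · subst hs
      dsimp only
      simp only [reduceIte]
      rw [default_eq _ hnd]
    · simp only [if_neg hs]
      set av := PySem.Set.ofList (h.map Prod.fst) with hav
      set l := (PySem.Str.split? s ",").getD [] with hl
      have hpre' : ∀ item ∈ l, PySem.Str.strip item = "" ∨ PySem.Str.strip item ∈ h.map Prod.fst := by
        simpa [Pre_selected_rewards, hl] using hpre
      set sel := (l.map PySem.Str.strip).filter (fun t => t ≠ "") with hselneed
      have hmemsel : ∀ t ∈ sel, t ∈ av := by
        intro t ht
        rw [List.mem_filter] at ht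
        obtain ⟨htm, htne⟩ := ht
        rw [List.mem_map] at htm
        obtain ⟨item, hil, rfl⟩ := htm
        rcases hpre' item hil with h0 | h0
        · simp [h0] at htne
        · rw [hav, PySem.Set.mem_ofList]; exact h0
      have hbad : (l.map PySem.Str.strip).filter (fun t => decide (t ≠ "") && !PySem.Set.contains av t) = [] := by
        rw [List.filter_eq_nil_iff]
        intro t htm
        by_cases hne : t = ""
        · simp [hne]
        · have h1 : t ∈ sel := by rw [hselneed, List.mem_filter]; simp [htm, hne]
          simp [hne]
          exact hmemsel t h1
      have hmiss : PySem.Set.diff (PySem.Set.ofList sel) av = [] := by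
        show (PySem.Set.ofList sel).filter _ = []
        rw [List.filter_eq_nil_iff]
        intro t htm
        rw [PySem.Set.mem_ofList] at htm
        simp only [Bool.not_eq_true', Bool.not_eq_false]
        exact (PySem.Set.contains_iff av t).mpr (hmemsel t htm)
      rw [foldl_req, hbad, hmiss]
      rw [show (PySem.List.sorted ([] : List String) (fun x => x)) = [] from rfl]
      simp [hselneed, List.filter_filter, Bool.and_comm]


-- ===== VERDICT (by name: the statement is the Claim_ definition above) =====
theorem selected_rewards_spec : Claim_equal_selected_rewards := by
  intro histories requested no_fixed _ hpre
  unfold Spec_selected_rewards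
  exact agree histories requested no_fixed hpre
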